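-- pv_equiv track=rewrite | github.com/gorzerk1/Printer-ETL-Hub | plugins/openticket/TonerOrder.py | _parse_color_list
-- ===== SOURCE A (Python) =====
-- def _parse_color_list(raw, available):
--     tokens = [t.strip() for t in raw.split(",") if t.strip()]
--     if len(tokens) == 1 and tokens[0].lower() == "all":
--         return available[:]
--     norm = {c.lower(): c for c in available}
--     picked = []
--     seen = set()
--     for t in tokens:
--         k = t.lower()
--         if k in norm and k not in seen:
--             picked.append(norm[k])
--             seen.add(k)
--         else:
--             return None
--     return picked
-- ===== SOURCE B (Python) =====
-- def _parse_color_list(raw, available):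
--     tokens = [t.strip() for t in raw.split(",") if t.strip()]
--     if len(tokens) == 1 and tokens[0].lower() == "all":
--         return available[:]
--
--     def pick(rest, picked):
--         if not rest:
--             return picked
--         k = rest[0].lower()
--         if any(p.lower() == k for p in picked):
--             return None
--         match = None
--         for c in available:
--             if c.lower() == k:
--                 match = c
--         if match is None:
--             return None
--         return pick(rest[1:], picked + [match])
--
--     return pick(tokens, [])
-- ===== Notes on version B (the rewrite author's own statement) =====
-- stated objective: alternative
-- what changed: A precomputes a lowercase->color dict and a seen set and consumes tokens in one guarded loop; B uses no dict and no set: a recursive resolver handles one token at a time, finding its color by a last-match linear scan over available and rejecting duplicates by scanning the already-picked output.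
import Mathlib
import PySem

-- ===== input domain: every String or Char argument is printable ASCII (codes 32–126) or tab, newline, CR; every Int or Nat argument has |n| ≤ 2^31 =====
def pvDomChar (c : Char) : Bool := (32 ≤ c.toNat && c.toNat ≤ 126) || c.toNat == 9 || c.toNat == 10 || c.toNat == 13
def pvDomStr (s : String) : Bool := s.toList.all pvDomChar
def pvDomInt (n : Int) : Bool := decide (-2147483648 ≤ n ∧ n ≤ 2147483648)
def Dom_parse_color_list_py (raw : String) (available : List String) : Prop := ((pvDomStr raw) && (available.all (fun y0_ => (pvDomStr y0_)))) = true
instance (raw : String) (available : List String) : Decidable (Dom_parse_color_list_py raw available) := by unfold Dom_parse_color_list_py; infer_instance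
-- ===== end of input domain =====

-- B drops A's norm dict and seen set entirely: a recursive resolver finds each token's
-- color by a last-match linear scan of `available` and detects duplicates by scanning
-- the already-picked output; objective: alternative (no hashing, quadratic but tiny inputs).

-- tokens = [t.strip() for t in raw.split(",") if t.strip()]  (identical line in A and B)
def pvTokens (raw : String) : List String :=
  ((PySem.Str.split? raw ",").getD []).filterMap (fun t =>
    let s := PySem.Str.strip t
    if s ≠ "" then some s else none)

-- ===== PORT A =====
-- norm = {c.lower(): c for c in available}
def pvNorm (available : List String) : PySem.Dict String String :=
  available.foldl (fun d c => d.insert (PySem.Str.lower c) c) PySem.Dict.empty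

-- A's loop: picked/seen accumulation with early return None
def pvLoopA (norm : PySem.Dict String String) (picked : List String)
    (seen : PySem.Set String) : List String → Option (List String)
  | [] => some picked
  | t :: ts =>
    let k := PySem.Str.lower t
    if norm.contains k && !(PySem.Set.contains seen k) then
      pvLoopA norm (picked ++ [norm.getD k ""]) (PySem.Set.add seen k) ts
    else none

def parse_color_list_py (raw : String) (available : List String) : Option (List String) :=
  let tokens := pvTokens raw
  if tokens.length = 1 ∧ PySem.Str.lower (tokens.headD "") = "all" then some available
  else pvLoopA (pvNorm available) [] PySem.Set.empty tokens

-- ===== PORT B =====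
-- match = None; for c in available: if c.lower() == k: match = c   (last match wins)
def pvFindLast (available : List String) (k : String) : Option String :=
  available.foldl (fun m c => if PySem.Str.lower c = k then some c else m) none

-- def pick(rest, picked): …  (recursion over the remaining tokens)
def pvPick (available : List String) : List String → List String → Option (List String)
  | [], picked => some picked
  | t :: ts, picked =>
    let k := PySem.Str.lower t
    if picked.any (fun p => PySem.Str.lower p == k) then none
    else
      match pvFindLast available k with
      | none => none
      | some c => pvPick available ts (picked ++ [c])

def parse_color_list_py_alt (raw : String) (available : List String) : Option (List String) :=
  let tokens := pvTokens raw
  if tokens.length = 1 ∧ PySem.Str.lower (tokens.headD "") = "all" then some available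
  else pvPick available tokens []

-- ===== PRECONDITION & SPEC =====
def Spec_parse_color_list_py (raw : String) (available : List String) (out : Option (List String)) : Prop := out = parse_color_list_py_alt raw available
instance (raw : String) (available : List String) (out : Option (List String)) : Decidable (Spec_parse_color_list_py raw available out) := by unfold Spec_parse_color_list_py; infer_instance

-- ===== CLAIM =====
def Claim_equal_parse_color_list_py : Prop := ∀ (raw : String) (available : List String), Dom_parse_color_list_py raw available → Spec_parse_color_list_py raw available (parse_color_list_py raw available)

-- ===== LEMMAS AND PROOFS =====

-- B's last-match scan computes exactly A's dict lookup.
theorem pvFindLast_eq_get? (available : List String) (k : String) :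
    pvFindLast available k = (pvNorm available).get? k := by
  suffices h : ∀ (d : PySem.Dict String String),
      (available.foldl (fun d c => d.insert (PySem.Str.lower c) c) d).get? k
        = available.foldl (fun m c => if PySem.Str.lower c = k then some c else m) (d.get? k) by
    have := h PySem.Dict.empty
    simp only [PySem.Dict.get?_empty] at this
    simp [pvFindLast, pvNorm, this]
  induction available with
  | nil => intro d; rfl
  | cons c cs ih =>
    intro d
    simp only [List.foldl_cons, ih]
    congr 1
    rw [PySem.Dict.get?_insert]
    by_cases h : PySem.Str.lower c = k
    · simp [h]
    · simp [h, Ne.symm h]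

-- Any value B's scan returns has the looked-up lowercase key.
theorem pvFindLast_lower (available : List String) (k c : String)
    (h : pvFindLast available k = some c) : PySem.Str.lower c = k := by
  suffices hgen : ∀ (m : Option String), (∀ x, m = some x → PySem.Str.lower x = k) →
      available.foldl (fun m c => if PySem.Str.lower c = k then some c else m) m = some c →
      PySem.Str.lower c = k by
    exact hgen none (by simp) h
  clear h
  induction available with
  | nil => intro m hm he; exact hm c he
  | cons a as ih =>
    intro m hm he
    rw [List.foldl_cons] at he
    refine ih (if PySem.Str.lower a = k then some a else m) ?_ he
    intro x hx
    by_cases hl : PySem.Str.lower a = k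
    · simp only [if_pos hl] at hx
      cases hx; exact hl
    · simp only [if_neg hl] at hx
      exact hm x hx

-- A's loop equals B's recursion whenever `seen` holds exactly the lowers of `picked`.
theorem pvLoopA_eq_pvPick (available : List String) :
    ∀ (ts picked : List String) (seen : PySem.Set String),
      (∀ k, PySem.Set.contains seen k = picked.any (fun p => PySem.Str.lower p == k)) →
      pvLoopA (pvNorm available) picked seen ts = pvPick available ts picked := by
  intro ts
  induction ts with
  | nil => intro picked seen _; rfl
  | cons t ts ih =>
    intro picked seen hinv
    simp only [pvLoopA, pvPick]
    by_cases hdup : picked.any (fun p => PySem.Str.lower p == PySem.Str.lower t) = true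
    · rw [if_pos hdup]
      have hseen : PySem.Set.contains seen (PySem.Str.lower t) = true := by
        rw [hinv]; exact hdup
      have hmem : PySem.Str.lower t ∈ seen := by
        simpa [PySem.Set.contains] using hseen
      rw [if_neg (by simp [hmem])]
    · rw [if_neg hdup]
      have hseen : PySem.Set.contains seen (PySem.Str.lower t) = false := by
        rw [hinv]; simpa using hdup
      cases hfind : pvFindLast available (PySem.Str.lower t) with
      | none =>
        have hcont : (pvNorm available).contains (PySem.Str.lower t) = false := by
          rw [PySem.Dict.contains_eq_isSome_get?, ← pvFindLast_eq_get?, hfind]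
          rfl
        rw [if_neg (by simp [hcont])]
      | some c =>
        have hcont : (pvNorm available).contains (PySem.Str.lower t) = true := by
          rw [PySem.Dict.contains_eq_isSome_get?, ← pvFindLast_eq_get?, hfind]
          rfl
        have hgetD : (pvNorm available).getD (PySem.Str.lower t) "" = c := by
          rw [PySem.Dict.getD_eq_get?_getD, ← pvFindLast_eq_get?, hfind]
          rfl
        have hnmem : PySem.Str.lower t ∉ seen := by
          intro hm
          rw [show PySem.Set.contains seen (PySem.Str.lower t) = true by
            simpa [PySem.Set.contains] using hm] at hseen
          exact absurd hseen (by simp)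
        rw [if_pos (by simp only [hcont, Bool.true_and, Bool.not_eq_true']; rw [hseen]), hgetD]
        apply ih
        intro k
        have hadd : PySem.Set.add seen (PySem.Str.lower t) = seen ++ [PySem.Str.lower t] := by
          simp only [PySem.Set.add, hseen, Bool.false_eq_true, if_false]
        have hlc : PySem.Str.lower c = PySem.Str.lower t := pvFindLast_lower _ _ _ hfind
        rw [hadd]
        have h1 : (seen ++ [PySem.Str.lower t] : List String).contains k
            = (PySem.Set.contains seen k || (PySem.Str.lower t == k)) := by
          by_cases hk : k = PySem.Str.lower t
          · simp [PySem.Set.contains, hk]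
          · simp [PySem.Set.contains, hk, Ne.symm hk]
        show (seen ++ [PySem.Str.lower t] : List String).contains k = _
        rw [h1, hinv k]
        by_cases hk : k = PySem.Str.lower t <;> simp [List.any_append, hlc, hk]

-- ===== VERDICT =====
theorem parse_color_list_py_spec : Claim_equal_parse_color_list_py := by
  intro raw available _
  unfold Spec_parse_color_list_py parse_color_list_py parse_color_list_py_alt
  by_cases hall : (pvTokens raw).length = 1 ∧ PySem.Str.lower ((pvTokens raw).headD "") = "all"
  · simp only [if_pos hall]
  · simp only [if_neg hall]
    exact pvLoopA_eq_pvPick available (pvTokens raw) [] PySem.Set.empty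
      (by intro k; simp [PySem.Set.empty, PySem.Set.contains])
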